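-- pv_equiv track=rewrite | github.com/JSebastian-Villa/Analisis_de_algoritmos | codigosbacktracking.py | formar_grupos
-- ===== SOURCE A (Python) =====
-- def formar_grupos(personas, incompatibles, k):
--     resultado = []
--
--     def son_compatibles(grupo, persona):
--         for p in grupo:
--             if (p, persona) in incompatibles or (persona, p) in incompatibles:
--                 return False
--         return True
--
--     def backtrack(i, grupo):
--         if len(grupo) == k:
--             resultado.append(grupo[:])
--             return
--
--         if i == len(personas):
--             return
--
--         if len(grupo) + (len(personas) - i) < k:
--             return
--
--         if son_compatibles(grupo, personas[i]):
--             grupo.append(personas[i])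
--             backtrack(i + 1, grupo)
--             grupo.pop()
--
--         backtrack(i + 1, grupo)
--
--     backtrack(0, [])
--     return resultado
-- ===== SOURCE B (Python) =====
-- def formar_grupos(personas, incompatibles, k):
--     # Generate-and-test: enumerate all k-combinations (lexicographic by index),
--     # keep those whose members are pairwise compatible.
--     def combos(n, xs):
--         if n == 0:
--             return [[]]
--         if not xs:
--             return []
--         head, tail = xs[0], xs[1:]
--         return [[head] + c for c in combos(n - 1, tail)] + combos(n, tail)
--
--     def ok(p, q):
--         return (p, q) not in incompatibles and (q, p) not in incompatibles
--
--     def compatible(grupo):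
--         if not grupo:
--             return True
--         p, resto = grupo[0], grupo[1:]
--         return all(ok(p, q) for q in resto) and compatible(resto)
--
--     if k < 0:
--         return []
--     return [g for g in combos(k, personas) if compatible(g)]
-- ===== Notes on version B (the rewrite author's own statement) =====
-- stated objective: simpler
-- what changed: Replaced the recursive include/exclude backtracking with incremental compatibility checking and remaining-count pruning by a flat generate-and-test: enumerate all k-combinations recursively and filter each complete group by a pairwise compatibility test.
import Mathlib
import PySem

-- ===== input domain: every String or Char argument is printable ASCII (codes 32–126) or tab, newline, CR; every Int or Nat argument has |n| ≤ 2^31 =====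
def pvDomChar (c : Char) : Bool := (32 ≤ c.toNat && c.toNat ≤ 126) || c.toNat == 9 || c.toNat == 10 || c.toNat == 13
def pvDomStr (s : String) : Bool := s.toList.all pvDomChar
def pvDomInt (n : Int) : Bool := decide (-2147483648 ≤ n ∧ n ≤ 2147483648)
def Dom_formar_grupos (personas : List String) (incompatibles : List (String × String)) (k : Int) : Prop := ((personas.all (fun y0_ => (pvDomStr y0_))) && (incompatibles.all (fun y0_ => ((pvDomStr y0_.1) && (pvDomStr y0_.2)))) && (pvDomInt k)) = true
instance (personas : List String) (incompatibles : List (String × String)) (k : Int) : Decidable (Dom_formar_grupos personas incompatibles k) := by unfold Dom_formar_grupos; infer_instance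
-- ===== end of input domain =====

-- B replaces A's pruning include/exclude backtracking by a flat generate-and-test over all
-- k-combinations (objective: simpler); return values match on all inputs.

-- ===== PORT A =====
-- A's son_compatibles: loop over grupo with early 'return False'
def pvSonCompat (inc : List (String × String)) (grupo : List String) (persona : String) : Bool :=
  match grupo with
  | [] => true
  | p :: rest =>
    if (p, persona) ∈ inc ∨ (persona, p) ∈ inc then false
    else pvSonCompat inc rest persona

-- A's backtrack(i, grupo); the index i is carried as the suffix personas[i:] (rest), so
-- 'i == len(personas)' is 'rest = []', 'len(personas) - i' is 'rest.length' and
-- 'personas[i]' is the head of rest; branches and their order are A's.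
def pvBacktrack (inc : List (String × String)) (k : Int) (rest : List String) (grupo : List String) : List (List String) :=
  if (grupo.length : Int) = k then [grupo]
  else match rest with
  | [] => []
  | x :: rest' =>
    if (grupo.length : Int) + ((rest'.length : Int) + 1) < k then []
    else
      (if pvSonCompat inc grupo x then pvBacktrack inc k rest' (grupo ++ [x]) else [])
      ++ pvBacktrack inc k rest' grupo

def formar_grupos (personas : List String) (incompatibles : List (String × String)) (k : Int) : List (List String) :=
  pvBacktrack incompatibles k personas []

-- ===== PORT B =====
-- Source B's combos(n, xs)
def pvCombos (n : Nat) (xs : List String) : List (List String) :=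
  match n, xs with
  | 0, _ => [[]]
  | _ + 1, [] => []
  | m + 1, x :: tail => ((pvCombos m tail).map (fun c => x :: c)) ++ pvCombos (m + 1) tail

-- Source B's ok(p, q)
def pvOk (inc : List (String × String)) (p q : String) : Bool :=
  !(decide ((p, q) ∈ inc)) && !(decide ((q, p) ∈ inc))

-- Source B's compatible(grupo)
def pvCompatible (inc : List (String × String)) (grupo : List String) : Bool :=
  match grupo with
  | [] => true
  | p :: resto => resto.all (fun q => pvOk inc p q) && pvCompatible inc resto

def formar_grupos_alt (personas : List String) (incompatibles : List (String × String)) (k : Int) : List (List String) :=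
  if k < 0 then []
  else (pvCombos k.toNat personas).filter (fun g => pvCompatible incompatibles g)

-- ===== PRECONDITION & SPEC =====
def Spec_formar_grupos (personas : List String) (incompatibles : List (String × String)) (k : Int) (out : List (List String)) : Prop := out = formar_grupos_alt personas incompatibles k
instance (personas : List String) (incompatibles : List (String × String)) (k : Int) (out : List (List String)) : Decidable (Spec_formar_grupos personas incompatibles k out) := by unfold Spec_formar_grupos; infer_instance

-- ===== CLAIM (what is proved, stated in full; the proofs are below) =====
def Claim_equal_formar_grupos : Prop := ∀ (personas : List String) (incompatibles : List (String × String)) (k : Int), Dom_formar_grupos personas incompatibles k → Spec_formar_grupos personas incompatibles k (formar_grupos personas incompatibles k)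

-- ===== LEMMAS AND PROOFS =====

-- the compatibility of one extension step, as A builds it incrementally
def pvCompatExt (inc : List (String × String)) (grupo : List String) (c : List String) : Bool :=
  match c with
  | [] => true
  | x :: c' => pvSonCompat inc grupo x && pvCompatExt inc (grupo ++ [x]) c'

-- all of c compatible with all of g
def pvCross (inc : List (String × String)) (g c : List String) : Bool :=
  c.all (fun q => g.all (fun p => pvOk inc p q))

theorem pvSonCompat_eq_all (inc : List (String × String)) (grupo : List String) (persona : String) :
    pvSonCompat inc grupo persona = grupo.all (fun p => pvOk inc p persona) := by
  induction grupo with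
  | nil => rfl
  | cons p rest ih =>
    simp only [pvSonCompat, List.all_cons, ih, pvOk]
    by_cases h1 : (p, persona) ∈ inc <;> by_cases h2 : (persona, p) ∈ inc <;> simp [h1, h2]

theorem pvCompatExt_eq (inc : List (String × String)) (c g : List String) :
    pvCompatExt inc g c = (pvCross inc g c && pvCompatible inc c) := by
  induction c generalizing g with
  | nil => simp [pvCompatExt, pvCross, pvCompatible]
  | cons x c' ih =>
    simp only [pvCompatExt, ih, pvCross, pvCompatible, pvSonCompat_eq_all]
    rw [Bool.eq_iff_iff]
    simp only [Bool.and_eq_true, List.all_eq_true, List.all_append, List.all_cons, List.all_nil]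
    constructor
    · rintro ⟨h1, h2, h3⟩
      refine ⟨⟨?_, fun q hq => (h2 q hq).1⟩, ⟨fun q hq => ?_, h3⟩⟩
      · intro p hp; exact h1 p hp
      · have := (h2 q hq).2; simpa using this
    · rintro ⟨⟨h1, h2⟩, h3, h4⟩
      refine ⟨h1, fun q hq => ⟨h2 q hq, ?_⟩, h4⟩
      simpa using h3 q hq
  
theorem pvCombos_nil (n : Nat) (xs : List String) (h : xs.length < n) : pvCombos n xs = [] := by
  induction xs generalizing n with
  | nil => cases n with | zero => omega | succ m => rfl
  | cons x tail ih =>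
    cases n with
    | zero => omega
    | succ m =>
      simp only [pvCombos]
      rw [ih m (by simpa using h), ih (m + 1) (by simp at h ⊢; omega)]
      simp

theorem pvFilter_map_cons (p : List String → Bool) (x : String) (l : List (List String)) :
    (l.map (fun c => x :: c)).filter p = (l.filter (fun c => p (x :: c))).map (fun c => x :: c) := by
  induction l with
  | nil => rfl
  | cons c l ih =>
    simp only [List.map_cons, List.filter_cons]
    by_cases h : p (x :: c) = true <;> simp [h, ih]

theorem pvBacktrack_neg (inc : List (String × String)) (k : Int) (hk : k < 0)
    (rest grupo : List String) : pvBacktrack inc k rest grupo = [] := by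
  induction rest generalizing grupo with
  | nil =>
    simp only [pvBacktrack]
    rw [if_neg (by omega)]
  | cons x rest' ih =>
    simp only [pvBacktrack]
    rw [if_neg (by omega)]
    split
    · rfl
    · rw [ih (grupo ++ [x]), ih grupo]; simp
      
theorem pvBacktrack_main (inc : List (String × String)) (k : Int) (hk : 0 ≤ k)
    (rest grupo : List String) (hle : (grupo.length : Int) ≤ k) :
    pvBacktrack inc k rest grupo =
      ((pvCombos (k.toNat - grupo.length) rest).filter (fun c => pvCompatExt inc grupo c)).map
        (fun c => grupo ++ c) := by
  induction rest generalizing grupo with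
  | nil =>
    by_cases h : (grupo.length : Int) = k
    · have hz : k.toNat - grupo.length = 0 := by omega
      simp [pvBacktrack, h, hz, pvCombos, pvCompatExt]
    · have hpos : 0 < k.toNat - grupo.length := by omega
      rw [pvBacktrack, if_neg h]
      rw [pvCombos_nil _ _ (by simpa using hpos)]
      rfl
  | cons x rest' ih =>
    by_cases h : (grupo.length : Int) = k
    · have hz : k.toNat - grupo.length = 0 := by omega
      simp [pvBacktrack, h, hz, pvCombos, pvCompatExt]
    · have hlt : (grupo.length : Int) < k := lt_of_le_of_ne hle h
      rw [pvBacktrack, if_neg h]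
      by_cases hp : (grupo.length : Int) + ((rest'.length : Int) + 1) < k
      · rw [if_pos hp]
        rw [pvCombos_nil _ _ (by simp; omega)]
        rfl
      · rw [if_neg hp]
        have hm : k.toNat - grupo.length = (k.toNat - (grupo.length + 1)) + 1 := by omega
        rw [hm]
        simp only [pvCombos, List.filter_append, List.map_append]
        rw [pvFilter_map_cons]
        congr 1
        · by_cases hs : pvSonCompat inc grupo x = true
          · rw [if_pos hs, ih (grupo ++ [x]) (by simp; omega)]
            have hpred : ∀ c, pvCompatExt inc grupo (x :: c) = pvCompatExt inc (grupo ++ [x]) c := by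
              intro c
              show (pvSonCompat inc grupo x && pvCompatExt inc (grupo ++ [x]) c) = _
              rw [hs]; simp
            rw [List.filter_congr (fun c _ => hpred c), List.map_map]
            simp only [List.length_append, List.length_cons, List.length_nil, Nat.zero_add]
            refine List.map_congr_left (fun c _ => ?_)
            simp
          · rw [if_neg hs]
            rw [List.filter_eq_nil_iff.mpr (fun c _ => by
              show ¬ pvCompatExt inc grupo (x :: c) = true
              rw [pvCompatExt]; simp [hs])]
            rfl
        · rw [← hm]; exact ih grupo hle

theorem pvCompatExt_nil_eq (inc : List (String × String)) (c : List String) :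
    pvCompatExt inc [] c = pvCompatible inc c := by
  rw [pvCompatExt_eq]
  simp [pvCross]

-- ===== VERDICT (by name: the statement is the Claim_ definition above) =====
theorem formar_grupos_spec : Claim_equal_formar_grupos := by
  intro personas incompatibles k _
  unfold Spec_formar_grupos formar_grupos formar_grupos_alt
  by_cases hk : k < 0
  · rw [if_pos hk, pvBacktrack_neg _ _ hk]
  · rw [if_neg hk]
    rw [pvBacktrack_main incompatibles k (not_lt.mp hk) personas [] (by simp; omega)]
    simp only [List.length_nil, Nat.sub_zero]
    rw [List.filter_congr (fun c _ => pvCompatExt_nil_eq incompatibles c)]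
    simp
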